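-- pv_equiv track=rewrite | github.com/harrisonized/interview-practice | functions/iterators.py | idx_for_diag_sw_from_tl
-- ===== SOURCE A (Python) =====
-- def idx_for_diag_sw_from_tl(num_rows=2, num_cols=3):
--     """Traverse southwest diagonals from top left
--     Eg.
--           0    1    2
--         //   //   //
--     ['A', 'B', 'C']  3
--         //   //   //
--     ['D', 'E', 'F']
--
--     Returns row and col indices for: A, B, D, C, E, F
--     """
--
--     # upper left triangle
--     for col in range(num_cols):
--         row = 0
--         while row < num_rows and col >= 0:
--             yield row, col
--             row += 1
--             col -= 1
--
--     # lower right triangle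
--     for row in range(1, num_rows):
--         col = num_cols-1
--         while row < num_rows and col >= 0:
--             yield row, col
--             row += 1
--             col -= 1
-- ===== SOURCE B (Python) =====
-- def idx_for_diag_sw_from_tl(num_rows=2, num_cols=3):
--     """Same traversal, computed by anti-diagonal index d = row + col."""
--     for d in range(num_rows + num_cols - 1):
--         for row in range(max(0, d - num_cols + 1), min(num_rows - 1, d) + 1):
--             yield row, d - row
-- ===== Notes on version B (the rewrite author's own statement) =====
-- stated objective: simpler
-- what changed: Replaces A's two triangle loops (each restarting an inner while-walk per diagonal) by a single pass over the anti-diagonal index d = row+col with computed per-diagonal row bounds.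
import Mathlib
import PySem

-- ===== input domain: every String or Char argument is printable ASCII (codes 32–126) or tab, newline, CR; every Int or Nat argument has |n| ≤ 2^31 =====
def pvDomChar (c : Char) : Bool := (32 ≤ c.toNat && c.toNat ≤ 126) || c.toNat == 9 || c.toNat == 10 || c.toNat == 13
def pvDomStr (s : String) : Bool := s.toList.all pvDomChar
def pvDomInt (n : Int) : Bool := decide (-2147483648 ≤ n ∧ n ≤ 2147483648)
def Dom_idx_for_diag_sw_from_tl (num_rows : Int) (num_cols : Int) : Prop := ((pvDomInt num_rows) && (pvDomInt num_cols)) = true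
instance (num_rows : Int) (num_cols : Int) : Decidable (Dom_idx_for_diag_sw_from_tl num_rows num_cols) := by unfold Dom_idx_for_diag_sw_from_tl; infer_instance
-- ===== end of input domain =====

-- B replaces A's two triangle loops (each with an inner diagonal walk) by a single
-- pass over the anti-diagonal index d = row + col with computed row bounds (objective: simpler).


-- ===== PORT A =====
-- the inner 'while row < num_rows and col >= 0: yield row, col; row += 1; col -= 1'
def pvWalk (num_rows : Int) (row : Int) (col : Int) : List (Int × Int) :=
  if h : row < num_rows ∧ 0 ≤ col then (row, col) :: pvWalk num_rows (row + 1) (col - 1)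
  else []
termination_by (col + 1).toNat
decreasing_by omega

def idx_for_diag_sw_from_tl (num_rows : Int) (num_cols : Int) : List (Int × Int) :=
  -- upper left triangle
  (PySem.List.pyRange 0 num_cols 1).flatMap (fun col => pvWalk num_rows 0 col) ++
  -- lower right triangle
  (PySem.List.pyRange 1 num_rows 1).flatMap (fun row => pvWalk num_rows row (num_cols - 1))

-- ===== PORT B =====
def idx_for_diag_sw_from_tl_alt (num_rows : Int) (num_cols : Int) : List (Int × Int) :=
  (PySem.List.pyRange 0 (num_rows + num_cols - 1) 1).flatMap (fun d =>
    (PySem.List.pyRange (max 0 (d - num_cols + 1)) (min (num_rows - 1) d + 1) 1).map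
      (fun row => (row, d - row)))

-- ===== PRECONDITION & SPEC =====
def Spec_idx_for_diag_sw_from_tl (num_rows : Int) (num_cols : Int) (out : List (Int × Int)) : Prop := out = idx_for_diag_sw_from_tl_alt num_rows num_cols
instance (num_rows : Int) (num_cols : Int) (out : List (Int × Int)) : Decidable (Spec_idx_for_diag_sw_from_tl num_rows num_cols out) := by unfold Spec_idx_for_diag_sw_from_tl; infer_instance

-- ===== CLAIM (what is proved, stated in full; the proofs are below) =====
def Claim_equal_idx_for_diag_sw_from_tl : Prop := ∀ (num_rows : Int) (num_cols : Int), Dom_idx_for_diag_sw_from_tl num_rows num_cols → Spec_idx_for_diag_sw_from_tl num_rows num_cols (idx_for_diag_sw_from_tl num_rows num_cols)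

-- ===== LEMMAS AND PROOFS =====

theorem pyRange_one_nil {a b : Int} (h : b ≤ a) : PySem.List.pyRange a b 1 = [] := by
  apply List.eq_nil_iff_forall_not_mem.mpr
  intro x hx
  have := PySem.List.mem_pyRange_one.mp hx
  omega

-- A's inner while loop yields exactly the rows of one anti-diagonal d = row + col
theorem pvWalk_eq_map (num_rows : Int) : ∀ (row col : Int),
    pvWalk num_rows row col =
      (PySem.List.pyRange row (min num_rows (row + col + 1)) 1).map
        (fun r => (r, row + col - r)) := by
  intro row col
  induction row, col using pvWalk.induct num_rows with
  | case1 row col h ih =>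
    rw [pvWalk, dif_pos h, ih]
    have harg : row + 1 + (col - 1) = row + col := by omega
    rw [harg]
    rw [PySem.List.pyRange_one_cons (show row < min num_rows (row + col + 1) by omega)]
    simp only [List.map_cons]
    rw [show row + col - row = col from by omega]
  | case2 row col h =>
    rw [pvWalk, dif_neg h]
    rw [pyRange_one_nil (by omega)]
    rfl

theorem pyRange_map_add : ∀ (a b k : Int),
    (PySem.List.pyRange a b 1).map (· + k) = PySem.List.pyRange (a + k) (b + k) 1 := by
  intro a b k
  by_cases hab : b ≤ a
  · rw [pyRange_one_nil hab, pyRange_one_nil (by omega)]; rfl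
  · replace hab : a < b := by omega
    have hn : (b - a).toNat = b - a := by omega
    induction hd : (b - a).toNat generalizing a with
    | zero => omega
    | succ t ih =>
      rw [PySem.List.pyRange_one_cons hab, PySem.List.pyRange_one_cons (by omega : a + k < b + k)]
      simp only [List.map_cons]
      by_cases h2 : a + 1 < b
      · rw [ih (a + 1) h2 (by omega) (by omega)]
        congr 2
        omega
      · have hb : b = a + 1 := by omega
        subst hb
        rw [pyRange_one_nil (by omega), pyRange_one_nil (by omega)]
        rfl

-- ===== VERDICT (by name: the statement is the Claim_ definition above) =====
theorem idx_for_diag_sw_from_tl_spec : Claim_equal_idx_for_diag_sw_from_tl := by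
  intro n m _
  show idx_for_diag_sw_from_tl n m = idx_for_diag_sw_from_tl_alt n m
  unfold idx_for_diag_sw_from_tl idx_for_diag_sw_from_tl_alt
  by_cases hm : m ≤ 0
  · rw [pyRange_one_nil hm]
    simp only [List.flatMap_nil, List.nil_append]
    rw [List.flatMap_eq_nil_iff.mpr, List.flatMap_eq_nil_iff.mpr]
    · intro d _
      rw [pyRange_one_nil (by omega)]
      rfl
    · intro row _
      rw [pvWalk, dif_neg (by omega)]
  · by_cases hn : n ≤ 0
    · rw [pyRange_one_nil (show n ≤ 1 by omega)]
      simp only [List.flatMap_nil, List.append_nil]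
      rw [List.flatMap_eq_nil_iff.mpr, List.flatMap_eq_nil_iff.mpr]
      · intro d _
        rw [pyRange_one_nil (by omega)]
        rfl
      · intro col _
        rw [pvWalk, dif_neg (by omega)]
    · replace hm : 0 < m := by omega
      replace hn : 0 < n := by omega
      rw [PySem.List.pyRange_one_append 0 m (n + m - 1) (by omega) (by omega),
          List.flatMap_append]
      congr 1
      · -- upper left triangle = diagonals 0 .. m-1
        apply List.flatMap_congr
        intro d hd
        have hdm := PySem.List.mem_pyRange_one.mp hd
        rw [pvWalk_eq_map]
        have h1 : max 0 (d - m + 1) = (0 : Int) := by omega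
        have h2 : min (n - 1) d + 1 = min n (0 + d + 1) := by omega
        rw [h1, h2]
        apply List.map_congr_left
        intro r _
        exact Prod.ext rfl (by omega)
      · -- lower right triangle = diagonals m .. n+m-2
        have hshift : PySem.List.pyRange m (n + m - 1) 1 =
            (PySem.List.pyRange 1 n 1).map (· + (m - 1)) := by
          rw [pyRange_map_add]
          congr 1 <;> try omega
        rw [hshift, List.flatMap_map]
        apply List.flatMap_congr
        intro row hrow
        have hr := PySem.List.mem_pyRange_one.mp hrow
        rw [pvWalk_eq_map]
        have h1 : max 0 (row + (m - 1) - m + 1) = row := by omega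
        have h2 : min (n - 1) (row + (m - 1)) + 1 = min n (row + (m - 1) + 1) := by omega
        rw [h1, h2]
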